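-- pv_equiv track=rewrite | github.com/Matteo-Candi/Master-Thesis | results/test_01/test_01_formatted.py | findMinOperations
-- ===== SOURCE A (Python) =====
-- def findMinOperations(arr, N, K):
--     operations = 0
--     for i in range(K):
--         freq = {}
--         for j in range(i, N, K):
--             freq[arr[j]] = freq.get(arr[j], 0) + 1
--         max1 = 0
--         num = 0
--         for entry in freq.items():
--             if entry[1] > max1:
--                 max1 = entry[1]
--                 num = entry[0]
--         for entry in freq.items():
--             if entry[0] != num:
--                 operations += entry[1]
--     return operations
-- ===== SOURCE B (Python) =====
-- def findMinOperations(arr, N, K):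
--     # Sort-then-scan: sort the (residue, value) pairs lexicographically, then one
--     # linear scan over runs of equal pairs; answer = total pairs - sum of the
--     # longest run per residue block. No dictionaries at all.
--     if K <= 0:
--         return 0
--     pairs = sorted((j % K, arr[j]) for j in range(N))
--     total = len(pairs)
--     best_sum = 0
--     i = 0
--     while i < total:
--         r = pairs[i][0]
--         best = 0
--         while i < total and pairs[i][0] == r:
--             v = pairs[i][1]
--             c = 0
--             while i < total and pairs[i][0] == r and pairs[i][1] == v:
--                 c += 1
--                 i += 1
--             if c > best:
--                 best = c
--         best_sum += best
--     return total - best_sum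
-- ===== Notes on version B (the rewrite author's own statement) =====
-- stated objective: alternative
-- what changed: Replaces A's per-residue frequency dictionaries entirely with a sort-then-scan algorithm: build the list of (j%K, arr[j]) pairs, sort it lexicographically, and make one linear scan over runs of equal pairs, subtracting the longest run of each residue block from the total; no dict is used at all.
import Mathlib
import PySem

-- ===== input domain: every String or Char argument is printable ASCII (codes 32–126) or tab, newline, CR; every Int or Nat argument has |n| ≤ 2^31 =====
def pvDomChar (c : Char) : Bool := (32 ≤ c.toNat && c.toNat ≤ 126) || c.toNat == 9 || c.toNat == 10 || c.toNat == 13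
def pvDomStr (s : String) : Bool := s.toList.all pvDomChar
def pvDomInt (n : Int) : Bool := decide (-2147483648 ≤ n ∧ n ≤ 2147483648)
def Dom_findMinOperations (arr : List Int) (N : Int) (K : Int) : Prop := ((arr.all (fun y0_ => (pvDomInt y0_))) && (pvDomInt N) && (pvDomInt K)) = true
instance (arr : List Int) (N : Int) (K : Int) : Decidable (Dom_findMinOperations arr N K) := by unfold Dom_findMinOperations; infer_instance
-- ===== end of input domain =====

-- B replaces A's per-residue frequency dictionaries with sort-then-scan: sort the (j%K, arr[j])
-- pairs lexicographically and subtract each residue block's longest run from the total (alternative algorithm).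


-- ===== PORT A =====
-- arr[j] is ported as pyGetD with default 0; Pre_ guarantees every accessed index is in range.
def findMinOperations (arr : List Int) (N : Int) (K : Int) : Int :=
  (PySem.List.pyRange 0 K 1).foldl (fun operations i =>
    let freq : PySem.Dict Int Int :=
      (PySem.List.pyRange i N K).foldl
        (fun freq j =>
          freq.insert (PySem.List.pyGetD arr j 0) (freq.getD (PySem.List.pyGetD arr j 0) 0 + 1))
        PySem.Dict.empty
    -- max1, num tracked as one pair (max1, num)
    let mn : Int × Int :=
      freq.items.foldl (fun p entry => if entry.2 > p.1 then (entry.2, entry.1) else p) (0, 0)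
    freq.items.foldl
      (fun operations entry => if entry.1 ≠ mn.2 then operations + entry.2 else operations)
      operations) 0

-- ===== PORT B =====
-- B's innermost while loop: consume the leading run of pairs equal to (r, v),
-- returning the run length and the remaining suffix.
def pvRun (r v : Int) : List (Int × Int) → Int × List (Int × Int)
  | [] => (0, [])
  | p :: t =>
    if p.1 == r && p.2 == v then
      let pr := pvRun r v t
      (pr.1 + 1, pr.2)
    else (0, p :: t)

-- B's middle while loop: consume the whole residue-r block, run by run, keeping the best
-- (longest) run length seen. fuel is a pure totality guard (each step consumes >= 1 pair;
-- fuel = length of the list suffices).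
def pvBlock (fuel : Nat) (r : Int) (best : Int) (l : List (Int × Int)) : Int × List (Int × Int) :=
  match fuel, l with
  | _, [] => (best, [])
  | 0, l => (best, l)
  | fuel + 1, p :: t =>
    if p.1 == r then
      let pr := pvRun r p.2 t
      pvBlock fuel r (if pr.1 + 1 > best then pr.1 + 1 else best) pr.2
    else (best, p :: t)

-- B's outer while loop: sum the best run length of each residue block (same fuel guard).
def pvBlocks (fuel : Nat) (l : List (Int × Int)) : Int :=
  match fuel, l with
  | _, [] => 0
  | 0, _ => 0
  | fuel + 1, p :: t =>
    let pb := pvBlock (t.length + 1) p.1 0 (p :: t)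
    pb.1 + pvBlocks fuel pb.2

def findMinOperations_alt (arr : List Int) (N : Int) (K : Int) : Int :=
  if K ≤ 0 then 0
  else
    let pairs :=
      PySem.List.sorted
        ((PySem.List.pyRange 0 N 1).map (fun j => (PySem.Int.mod j K, PySem.List.pyGetD arr j 0)))
        (fun p => (toLex p : Lex (Int × Int)))
    (pairs.length : Int) - pvBlocks pairs.length pairs

-- ===== PRECONDITION & SPEC =====
-- A raises IndexError exactly when K ≥ 1 and N exceeds len(arr) (some strided index reaches
-- len(arr)); those inputs are excluded. For K ≤ 0 no index is ever accessed.
def Pre_findMinOperations (arr : List Int) (N : Int) (K : Int) : Prop :=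
  K ≤ 0 ∨ N ≤ (arr.length : Int)
instance (arr : List Int) (N : Int) (K : Int) : Decidable (Pre_findMinOperations arr N K) := by unfold Pre_findMinOperations; infer_instance

def pvWitness_findMinOperations : List Int × Int × Int := ([1, 2, 1, 3], 4, 2)

def Spec_findMinOperations (arr : List Int) (N : Int) (K : Int) (out : Int) : Prop := out = findMinOperations_alt arr N K
instance (arr : List Int) (N : Int) (K : Int) (out : Int) : Decidable (Spec_findMinOperations arr N K out) := by unfold Spec_findMinOperations; infer_instance

-- ===== CLAIM (what is proved, stated in full; the proofs are below) =====
def Claim_equal_findMinOperations : Prop := ∀ (arr : List Int) (N : Int) (K : Int), Dom_findMinOperations arr N K → Pre_findMinOperations arr N K → Spec_findMinOperations arr N K (findMinOperations arr N K)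

-- ===== LEMMAS AND PROOFS =====

-- the elements of residue class i, in A's (strided) visit order
def pvElems (arr : List Int) (N K i : Int) : List Int :=
  (PySem.List.pyRange i N K).map (fun j => PySem.List.pyGetD arr j 0)

-- the per-residue contribution A adds
def pvContrib (arr : List Int) (N K i : Int) : Int :=
  ((pvElems arr N K i).length : Int) -
    PySem.List.maxD (PySem.Dict.counter (pvElems arr N K i)).values (fun x => x) 0

-- A's (max1, num) pair-fold: the first component is a running max of the second components
lemma pv_pairfold_fst (l : List (Int × Int)) (m n : Int) :
    (l.foldl (fun p e => if e.2 > p.1 then (e.2, e.1) else p) (m, n)).1 =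
      l.foldl (fun a e => max a e.2) m := by
  induction l generalizing m n with
  | nil => rfl
  | cons e t ih =>
    simp only [List.foldl]
    split_ifs with h
    · rw [ih]; congr 1; omega
    · rw [ih]; congr 1; omega

-- A's pair-fold either keeps the initial state or returns (value, key) of some entry
lemma pv_pairfold_mem (l : List (Int × Int)) (m n : Int) :
    l.foldl (fun p e => if e.2 > p.1 then (e.2, e.1) else p) (m, n) = (m, n) ∨
      ((l.foldl (fun p e => if e.2 > p.1 then (e.2, e.1) else p) (m, n)).2,
       (l.foldl (fun p e => if e.2 > p.1 then (e.2, e.1) else p) (m, n)).1) ∈ l := by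
  induction l generalizing m n with
  | nil => left; rfl
  | cons e t ih =>
    simp only [List.foldl]
    split_ifs with h
    · rcases ih e.2 e.1 with h1 | h1
      · right; rw [h1]; left
      · right; right; exact h1
    · rcases ih m n with h1 | h1
      · left; exact h1
      · right; right; exact h1

-- summing the values of all entries whose key differs from num, when (num, mx) is an entry
-- and keys are distinct, gives (total sum of values) - mx
lemma pv_filter_ne_sum (l : List (Int × Int)) (num mx : Int)
    (hnd : (l.map Prod.fst).Nodup) (hm : (num, mx) ∈ l) :
    ((l.filter (fun e => decide (e.1 ≠ num))).map (fun e => e.2)).sum =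
      (l.map (fun e => e.2)).sum - mx := by
  induction l with
  | nil => cases hm
  | cons e t ih =>
    simp only [List.map_cons, List.nodup_cons] at hnd
    by_cases he : e.1 = num
    · have hnot : ∀ x ∈ t, x.1 ≠ num := by
        intro x hx hxe
        apply hnd.1
        rw [he, ← hxe]
        exact List.mem_map_of_mem hx
      have hemx : e = (num, mx) := by
        rcases List.mem_cons.mp hm with h | h
        · exact h.symm
        · exact absurd rfl (hnot _ h)
      have hfilt : t.filter (fun e => decide (e.1 ≠ num)) = t :=
        List.filter_eq_self.mpr (fun x hx => by simpa using hnot x hx)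
      rw [List.filter_cons_of_neg (by simp [he]), hfilt, List.map_cons, List.sum_cons, hemx]
      simp
    · have hm' : (num, mx) ∈ t := by
        rcases List.mem_cons.mp hm with h | h
        · exact absurd (by rw [← h]) he
        · exact h
      rw [List.filter_cons_of_pos (by simp [he]), List.map_cons, List.map_cons,
        List.sum_cons, List.sum_cons, ih hnd.2 hm']
      omega

-- the distinct elements with their counts sum to the length of the list
lemma pv_sum_counts (L : List Int) :
    ((PySem.Set.ofList L).map (fun k => (L.count k : Int))).sum = (L.length : Int) := by
  have hperm : (PySem.Set.ofList L).Perm L.dedup := by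
    rw [List.perm_ext_iff_of_nodup (PySem.Set.nodup_ofList L) L.nodup_dedup]
    intro a
    rw [PySem.Set.mem_ofList, List.mem_dedup]
  have h1 : ((PySem.Set.ofList L).map (fun k => (L.count k : Int))).sum
      = ((L.dedup.map (fun k => (L.count k : Int)))).sum :=
    (hperm.map _).sum_eq
  have h2 : (L.dedup.map (fun k => (L.count k : Int))).sum
      = ((L.dedup.map (fun k => L.count k)).sum : Int) := by
    rw [Nat.cast_list_sum, List.map_map]; rfl
  rw [h1, h2, List.sum_map_count_dedup_eq_length]

-- every stored count is at least 1
lemma pv_values_pos (L : List Int) :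
    ∀ v ∈ (PySem.Dict.counter L).values, 1 ≤ v := by
  intro v hv
  have : (PySem.Dict.counter L).values
      = (PySem.Set.ofList L).map (fun k => (L.count k : Int)) := by
    simp only [PySem.Dict.values, PySem.Dict.items_counter, List.map_map]; rfl
  rw [this] at hv
  rcases List.mem_map.mp hv with ⟨k, hk, hkv⟩
  have : k ∈ L := (PySem.Set.mem_ofList L k).mp hk
  have := List.count_pos_iff.mpr this
  omega

-- Python's max(vs, default=0) over a list of positive values is the running max from 0
lemma pv_maxD_pos (vs : List Int) (h : ∀ v ∈ vs, 1 ≤ v) :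
    PySem.List.maxD vs (fun x => x) 0 = vs.foldl max 0 := by
  cases vs with
  | nil => rfl
  | cons x t =>
    have hx : 1 ≤ x := h x (List.mem_cons_self)
    simp only [PySem.List.maxD, PySem.List.max?_id_cons, Option.getD_some, List.foldl]
    congr 1
    omega

-- (sum of values of counter L) = length L, stated on items
lemma pv_sum_counts' (L : List Int) :
    ((PySem.Dict.counter L).items.map (fun e => e.2)).sum = (L.length : Int) := by
  rw [PySem.Dict.items_counter, List.map_map]
  have : ((fun e => Prod.snd e) ∘ fun k => ((k : Int), (L.count k : Int)))
      = fun k => (L.count k : Int) := rfl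
  rw [this]
  exact pv_sum_counts L

-- A's inner per-residue block computes (group size) - (max count)
lemma pv_A_body_eq (L : List Int) (ops : Int) :
    (PySem.Dict.counter L).items.foldl
      (fun o e => if e.1 ≠ ((PySem.Dict.counter L).items.foldl
          (fun p e => if e.2 > p.1 then (e.2, e.1) else p) ((0 : Int), (0 : Int))).2
        then o + e.2 else o) ops
    = ops + (L.length : Int) - PySem.List.maxD (PySem.Dict.counter L).values (fun x => x) 0 := by
  set l := (PySem.Dict.counter L).items with hl
  set mn := l.foldl (fun p e => if e.2 > p.1 then (e.2, e.1) else p) ((0 : Int), (0 : Int)) with hmn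
  have hvals : (PySem.Dict.counter L).values = l.map (fun e => e.2) := rfl
  have hmax : PySem.List.maxD (PySem.Dict.counter L).values (fun x => x) 0
      = (l.map (fun e => e.2)).foldl max 0 := by
    rw [hvals, pv_maxD_pos _ (by rw [← hvals]; exact pv_values_pos L)]
  have hfst : mn.1 = (l.map (fun e => e.2)).foldl max 0 := by
    rw [hmn, pv_pairfold_fst, List.foldl_map]
  have hnd : (l.map Prod.fst).Nodup := by
    rw [hl, PySem.Dict.items_counter, List.map_map]
    have : ((fun e => Prod.fst e) ∘ fun k => (k, (L.count k : Int))) = id := rfl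
    rw [this, List.map_id]
    exact PySem.Set.nodup_ofList L
  rw [PySem.List.foldl_ite_eq_foldl_filter, PySem.List.foldl_add]
  by_cases hnil : l = []
  · have hlen : L.length = 0 := by
      by_contra h
      cases L with
      | nil => exact h rfl
      | cons a t =>
        have ha : a ∈ PySem.Set.ofList (a :: t) := (PySem.Set.mem_ofList _ a).mpr List.mem_cons_self
        have : (a, ((a :: t).count a : Int)) ∈ l := by
          rw [hl, PySem.Dict.items_counter]
          exact List.mem_map_of_mem ha
        rw [hnil] at this
        cases this
    rw [hmax, hnil, hlen]
    simp
  · obtain ⟨p, t, hL⟩ := List.exists_cons_of_ne_nil hnil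
    rcases pv_pairfold_mem l 0 0 with h1 | h1
    · exfalso
      have hm1 : mn.1 = 0 := by rw [hmn, h1]
      have hpmem : p.2 ∈ l.map (fun e => e.2) := by
        rw [hL]; exact List.mem_map_of_mem List.mem_cons_self
      have hp : 1 ≤ p.2 := by
        have := pv_values_pos L p.2 (by rw [hvals]; exact hpmem)
        omega
      have : p.2 ≤ (l.map (fun e => e.2)).foldl max 0 :=
        (PySem.List.le_foldl_max _ 0).2 p.2 hpmem
      rw [← hfst, hm1] at this
      omega
    · rw [← hmn] at h1
      have hsum := pv_filter_ne_sum l mn.2 mn.1 hnd h1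
      rw [hsum, hl, pv_sum_counts' L, hmax, ← hfst]
      omega

-- the indices of range(N) with j % K == i are exactly range(i, N, K)  (0 ≤ i < K)
lemma pv_filter_range_eq (N K i : Int) (hK : 0 < K) (hi0 : 0 ≤ i) (hiK : i < K) :
    (PySem.List.pyRange 0 N 1).filter (fun j => PySem.Int.mod j K == i) =
      PySem.List.pyRange i N K := by
  have h1 : ((PySem.List.pyRange 0 N 1).filter (fun j => PySem.Int.mod j K == i)).Pairwise (· < ·) :=
    (PySem.List.pairwise_lt_pyRange_one 0 N).filter _
  have h2 : (PySem.List.pyRange i N K).Pairwise (· < ·) := by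
    rw [PySem.List.pyRange_of_pos i N hK]
    exact List.Pairwise.map _
      (fun a b hab => by
        have hab' : (a : Int) < (b : Int) := by exact_mod_cast hab
        have := mul_lt_mul_of_pos_left hab' hK
        omega)
      List.pairwise_lt_range
  have hm : ∀ x : Int, (x ∈ (PySem.List.pyRange 0 N 1).filter (fun j => PySem.Int.mod j K == i))
      ↔ x ∈ PySem.List.pyRange i N K := by
    intro x
    rw [List.mem_filter, PySem.List.mem_pyRange_one, PySem.List.mem_pyRange_iff_of_pos hK,
      beq_iff_eq, PySem.Int.mod_eq_emod_of_pos hK]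
    constructor
    · rintro ⟨⟨hx0, hxN⟩, hmod⟩
      have hdm := Int.emod_add_ediv_mul x K
      have hq : 0 ≤ x / K := Int.ediv_nonneg hx0 hK.le
      have hKq : 0 ≤ x / K * K := mul_nonneg hq hK.le
      refine ⟨by linarith, hxN, ⟨x / K, by rw [mul_comm]; linarith⟩⟩
    · rintro ⟨hix, hxN, c, hc⟩
      have hx : x = i + K * c := by linarith
      refine ⟨⟨by linarith, hxN⟩, ?_⟩
      rw [hx, Int.add_mul_emod_self_left, Int.emod_eq_of_lt hi0 hiK]
  have nd1 := h1.imp (fun h => ne_of_lt h)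
  have nd2 := h2.imp (fun h => ne_of_lt h)
  have hperm : (PySem.List.pyRange i N K).Perm
      ((PySem.List.pyRange 0 N 1).filter (fun j => PySem.Int.mod j K == i)) :=
    (List.perm_ext_iff_of_nodup nd2 nd1).mpr (fun a => (hm a).symm)
  calc (PySem.List.pyRange 0 N 1).filter (fun j => PySem.Int.mod j K == i)
      = PySem.List.sorted ((PySem.List.pyRange 0 N 1).filter (fun j => PySem.Int.mod j K == i))
          (fun x => x) :=
        (PySem.List.sorted_eq_self_of_pairwise _ _ (h1.imp le_of_lt)).symm
    _ = PySem.List.pyRange i N K :=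
        PySem.List.sorted_eq_of_perm_of_pairwise_lt _ _ _ hperm h2

-- A's inner dict-building loop builds the counter of the residue-class elements
lemma pv_freq_eq (arr : List Int) (N K i : Int) :
    (PySem.List.pyRange i N K).foldl
      (fun freq j =>
        freq.insert (PySem.List.pyGetD arr j 0) (freq.getD (PySem.List.pyGetD arr j 0) 0 + 1))
      PySem.Dict.empty = PySem.Dict.counter (pvElems arr N K i) := by
  unfold pvElems
  rw [← PySem.Dict.foldl_insert_getD_add_one_eq_counter, List.foldl_map]

-- A computes the sum of the per-residue contributions
lemma pv_A_eq (arr : List Int) (N K : Int) :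
    findMinOperations arr N K =
      ((PySem.List.pyRange 0 K 1).map (fun i => pvContrib arr N K i)).sum := by
  unfold findMinOperations
  refine Eq.trans
    (PySem.List.foldl_congr_mem _ _ (fun ops i => ops + pvContrib arr N K i) 0 ?_) ?_
  · intro ops i hi
    simp only [pv_freq_eq arr N K i, pv_A_body_eq, pvContrib]
    omega
  · rw [PySem.List.foldl_add]
    simp

-- ==== B-side analysis ====

-- the unsorted pair list B builds
def pvPairs (arr : List Int) (N K : Int) : List (Int × Int) :=
  (PySem.List.pyRange 0 N 1).map (fun j => (PySem.Int.mod j K, PySem.List.pyGetD arr j 0))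

-- the sorted distinct residues of Q
def pvRs (Q : List (Int × Int)) : List Int :=
  PySem.List.sorted (PySem.Set.ofList (Q.map Prod.fst)) (fun x => x)

-- the sorted distinct values of residue class r of Q
def pvVs (Q : List (Int × Int)) (r : Int) : List Int :=
  PySem.List.sorted (PySem.Set.ofList ((Q.filter (fun p => p.1 == r)).map Prod.snd)) (fun x => x)

-- canonical sorted form of Q: residues in increasing order, values increasing inside a
-- residue, each pair repeated with its multiplicity
def pvCanon (Q : List (Int × Int)) : List (Int × Int) :=
  (pvRs Q).flatMap (fun r =>
    (pvVs Q r).flatMap (fun v => List.replicate (Q.count (r, v)) (r, v)))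

-- the max multiplicity of residue class r of Q
def pvMaxC (Q : List (Int × Int)) (r : Int) : Int :=
  ((pvVs Q r).map (fun v => (Q.count (r, v) : Int))).foldl max 0

-- sum over a nodup list of a function vanishing away from a:
lemma pv_sum_single {M : Type} [AddCommMonoid M] (S : List Int) (a : Int) (g : Int → M)
    (hnd : S.Nodup) (h0 : ∀ s ∈ S, s ≠ a → g s = 0) :
    (S.map g).sum = if a ∈ S then g a else 0 := by
  induction S with
  | nil => simp
  | cons s t ih =>
    simp only [List.nodup_cons] at hnd
    simp only [List.map_cons, List.sum_cons, List.mem_cons]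
    by_cases hsa : s = a
    · subst hsa
      rw [ih hnd.2 (fun x hx hxa => h0 x (List.mem_cons_of_mem _ hx) hxa), if_neg hnd.1,
        if_pos (Or.inl rfl)]
      simp
    · rw [h0 s List.mem_cons_self hsa, ih hnd.2 (fun x hx hxa => h0 x (List.mem_cons_of_mem _ hx) hxa)]
      have has : a ≠ s := fun hh => hsa hh.symm
      simp [has]

lemma pv_mem_Vs (Q : List (Int × Int)) (r v : Int) : v ∈ pvVs Q r ↔ (r, v) ∈ Q := by
  unfold pvVs
  rw [PySem.List.mem_sorted, PySem.Set.mem_ofList, List.mem_map]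
  constructor
  · rintro ⟨p, hp, hpv⟩
    rw [List.mem_filter] at hp
    have : p = (r, v) := by
      have := beq_iff_eq.mp hp.2
      exact Prod.ext this hpv
    rw [← this]; exact hp.1
  · intro h
    exact ⟨(r, v), List.mem_filter.mpr ⟨h, by simp⟩, rfl⟩

lemma pv_mem_Rs (Q : List (Int × Int)) (r : Int) : r ∈ pvRs Q ↔ r ∈ Q.map Prod.fst := by
  unfold pvRs
  rw [PySem.List.mem_sorted, PySem.Set.mem_ofList]

lemma pv_Rs_sorted (Q : List (Int × Int)) : (pvRs Q).Pairwise (· < ·) :=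
  PySem.List.sorted_ofList_pairwise_lt _

lemma pv_Vs_sorted (Q : List (Int × Int)) (r : Int) : (pvVs Q r).Pairwise (· < ·) :=
  PySem.List.sorted_ofList_pairwise_lt _

-- the canonical form is a permutation of Q
lemma pv_canon_perm (Q : List (Int × Int)) : (pvCanon Q).Perm Q := by
  rw [List.perm_iff_count]
  intro x
  unfold pvCanon
  rw [List.count_flatMap]
  have hinner : ∀ r : Int,
      ((pvVs Q r).map (List.count x ∘ fun v => List.replicate (Q.count (r, v)) (r, v))).sum
        = if x.1 = r ∧ x.2 ∈ pvVs Q r then Q.count x else 0 := by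
    intro r
    by_cases hxr : x.1 = r
    · subst hxr
      rw [pv_sum_single (pvVs Q x.1) x.2 _ ((pv_Vs_sorted Q x.1).imp ne_of_lt) ?_]
      · by_cases h : x.2 ∈ pvVs Q x.1
        · rw [if_pos h, if_pos ⟨rfl, h⟩]
          simp only [Function.comp, List.count_replicate]
          rw [if_pos (by simp)]
        · rw [if_neg h, if_neg (fun hc => h hc.2)]
      · intro s hs hsne
        simp only [Function.comp, List.count_replicate]
        rw [if_neg]
        simp only [beq_iff_eq]
        intro hc
        exact hsne (congrArg Prod.snd hc)
    · rw [List.sum_eq_zero, if_neg (by tauto)]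
      intro y hy
      rcases List.mem_map.mp hy with ⟨v, hv, hvy⟩
      rw [← hvy]
      simp only [Function.comp, List.count_replicate]
      rw [if_neg]
      simp only [beq_iff_eq]
      intro hc
      exact hxr (congrArg Prod.fst hc).symm
  have hmap : (pvRs Q).map
      (List.count x ∘ fun r => (pvVs Q r).flatMap fun v => List.replicate (Q.count (r, v)) (r, v))
      = (pvRs Q).map (fun r => if x.1 = r ∧ x.2 ∈ pvVs Q r then Q.count x else 0) := by
    refine List.map_congr_left (fun r _ => ?_)
    simp only [Function.comp, List.count_flatMap]
    exact hinner r
  rw [hmap, pv_sum_single (pvRs Q) x.1 _ ((pv_Rs_sorted Q).imp ne_of_lt)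
    (fun s _ hs => by rw [if_neg]; tauto)]
  by_cases hx : x ∈ Q
  · rw [if_pos ((pv_mem_Rs Q x.1).mpr (List.mem_map_of_mem hx)),
      if_pos ⟨rfl, (pv_mem_Vs Q x.1 x.2).mpr (by simpa using hx)⟩]
  · have h0 : List.count x Q = 0 := List.count_eq_zero.mpr hx
    rw [h0]
    split_ifs <;> rfl

-- the canonical form is sorted for the lexicographic key
lemma pv_canon_pairwise (Q : List (Int × Int)) :
    (pvCanon Q).Pairwise (fun a b => (toLex a : Lex (Int × Int)) ≤ toLex b) := by
  unfold pvCanon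
  rw [List.pairwise_flatMap]
  constructor
  · intro r hr
    rw [List.pairwise_flatMap]
    constructor
    · intro v hv
      rw [List.pairwise_replicate]
      right
      exact le_refl _
    · refine ((pv_Vs_sorted Q r).imp ?_)
      intro a b hab x hx y hy
      rw [(List.eq_of_mem_replicate hx), (List.eq_of_mem_replicate hy), Prod.Lex.le_iff]
      right
      exact ⟨rfl, le_of_lt hab⟩
  · refine ((pv_Rs_sorted Q).imp ?_)
    intro r1 r2 hr x hx y hy
    rcases List.mem_flatMap.mp hx with ⟨v1, _, hx1⟩
    rcases List.mem_flatMap.mp hy with ⟨v2, _, hy1⟩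
    rw [(List.eq_of_mem_replicate hx1), (List.eq_of_mem_replicate hy1), Prod.Lex.le_iff]
    left
    exact hr

-- sorting Q lexicographically gives exactly the canonical form
lemma pv_sorted_eq_canon (Q : List (Int × Int)) :
    PySem.List.sorted Q (fun p => (toLex p : Lex (Int × Int))) = pvCanon Q := by
  refine PySem.List.eq_of_perm_of_pairwise_le_of_injective
    (fun p => (toLex p : Lex (Int × Int))) toLex.injective
    ((PySem.List.sorted_perm Q _ _).trans (pv_canon_perm Q).symm) ?_ ?_
  · exact PySem.List.sorted_pairwise Q _
  · exact pv_canon_pairwise Q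

-- pvRun stops immediately on a list with no leading (r, v)
lemma pv_run_stop (r v : Int) (l : List (Int × Int))
    (h : ∀ p ∈ l, ¬(p.1 = r ∧ p.2 = v)) : pvRun r v l = (0, l) := by
  cases l with
  | nil => rfl
  | cons p t =>
    rw [pvRun, if_neg]
    simp only [Bool.and_eq_true, beq_iff_eq]
    exact h p List.mem_cons_self

-- pvRun consumes exactly a leading replicate
lemma pv_run_replicate (r v : Int) (m : Nat) (rest : List (Int × Int))
    (h : ∀ p ∈ rest, ¬(p.1 = r ∧ p.2 = v)) :
    pvRun r v (List.replicate m (r, v) ++ rest) = ((m : Int), rest) := by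
  induction m with
  | zero => simpa using pv_run_stop r v rest h
  | succ k ih =>
    rw [List.replicate_succ, List.cons_append, pvRun, if_pos (by simp)]
    simp only [ih]
    push_cast
    rfl

-- pvBlock stops immediately on a list with no leading residue-r pair (any fuel)
lemma pv_block_stop (fuel : Nat) (r best : Int) (l : List (Int × Int))
    (h : ∀ p ∈ l, p.1 ≠ r) : pvBlock fuel r best l = (best, l) := by
  cases l with
  | nil => cases fuel <;> rfl
  | cons p t =>
    cases fuel with
    | zero => rfl
    | succ n =>
      rw [pvBlock, if_neg]
      simp only [beq_iff_eq]
      exact h p List.mem_cons_self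

-- a flatMap of nonempty lists is at least as long as its index list
lemma pv_le_length_flatMap {α β : Type} (L : List α) (f : α → List β)
    (h : ∀ x ∈ L, f x ≠ []) : L.length ≤ (L.flatMap f).length := by
  induction L with
  | nil => simp
  | cons x t ih =>
    rw [List.flatMap_cons, List.length_append, List.length_cons]
    have h1 : 1 ≤ (f x).length :=
      List.length_pos_of_ne_nil (h x List.mem_cons_self)
    have h2 := ih (fun y hy => h y (List.mem_cons_of_mem _ hy))
    omega

-- pvBlock over a residue block computes the running max of the multiplicities
lemma pv_block_spec (fuel : Nat) (r : Int) (c : Int → Nat) (V : List Int) (best : Int)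
    (rest : List (Int × Int))
    (hfuel : V.length ≤ fuel)
    (hrest : ∀ p ∈ rest, p.1 ≠ r)
    (hc : ∀ v ∈ V, 1 ≤ c v) (hnd : V.Pairwise (· ≠ ·)) :
    pvBlock fuel r best (V.flatMap (fun v => List.replicate (c v) (r, v)) ++ rest) =
      ((V.map (fun v => (c v : Int))).foldl max best, rest) := by
  induction V generalizing best fuel with
  | nil => simpa using pv_block_stop fuel r best rest hrest
  | cons v V' ih =>
    obtain ⟨fuel', hf⟩ : ∃ fuel', fuel = fuel' + 1 := by
      cases fuel with
      | zero => simp at hfuel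
      | succ n => exact ⟨n, rfl⟩
    subst hf
    simp only [List.pairwise_cons] at hnd
    obtain ⟨m, hm⟩ : ∃ m, c v = m + 1 := ⟨c v - 1, by have := hc v List.mem_cons_self; omega⟩
    rw [List.flatMap_cons, hm, List.replicate_succ]
    simp only [List.cons_append, List.append_assoc]
    rw [pvBlock, if_pos (by simp)]
    have hrun : pvRun r v (List.replicate m (r, v) ++
        (V'.flatMap (fun v => List.replicate (c v) (r, v)) ++ rest)) =
        ((m : Int), V'.flatMap (fun v => List.replicate (c v) (r, v)) ++ rest) := by
      refine pv_run_replicate r v m _ ?_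
      intro p hp
      rcases List.mem_append.mp hp with hp1 | hp1
      · rcases List.mem_flatMap.mp hp1 with ⟨v', hv', hp2⟩
        rw [List.eq_of_mem_replicate hp2]
        intro hcon
        exact hnd.1 v' hv' hcon.2.symm
      · intro hcon
        exact hrest p hp1 hcon.1
    simp only [hrun]
    rw [ih fuel' _ (by simp at hfuel ⊢; omega) (fun v' hv' => hc v' (List.mem_cons_of_mem _ hv')) hnd.2]
    congr 1
    rw [List.map_cons, List.foldl_cons]
    congr 1
    have : (m : Int) + 1 = (c v : Int) := by rw [hm]; push_cast; ring
    rw [this]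
    split_ifs with h <;> omega

-- pvBlocks over the canonical-shaped list computes the sum of the per-residue maxima
lemma pv_blocks_spec (fuel : Nat) (c : Int → Int → Nat) (V : Int → List Int) (R : List Int)
    (hfuel : R.length ≤ fuel)
    (hV : ∀ r ∈ R, V r ≠ [])
    (hc : ∀ r ∈ R, ∀ v ∈ V r, 1 ≤ c r v)
    (hndV : ∀ r ∈ R, (V r).Pairwise (· ≠ ·))
    (hndR : R.Pairwise (· ≠ ·)) :
    pvBlocks fuel (R.flatMap (fun r => (V r).flatMap (fun v => List.replicate (c r v) (r, v)))) =
      (R.map (fun r => ((V r).map (fun v => (c r v : Int))).foldl max 0)).sum := by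
  induction R generalizing fuel with
  | nil => cases fuel <;> rfl
  | cons r R' ih =>
    obtain ⟨fuel', hf⟩ : ∃ fuel', fuel = fuel' + 1 := by
      cases fuel with
      | zero => simp at hfuel
      | succ n => exact ⟨n, rfl⟩
    subst hf
    simp only [List.pairwise_cons] at hndR
    obtain ⟨v0, V', hv0⟩ : ∃ v0 V', V r = v0 :: V' := by
      cases hVr : V r with
      | nil => exact absurd hVr (hV r List.mem_cons_self)
      | cons a b => exact ⟨a, b, rfl⟩
    obtain ⟨m, hm⟩ : ∃ m, c r v0 = m + 1 :=
      ⟨c r v0 - 1, by have := hc r List.mem_cons_self v0 (by rw [hv0]; exact List.mem_cons_self); omega⟩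
    have hrest : ∀ p ∈ R'.flatMap (fun r => (V r).flatMap
        (fun v => List.replicate (c r v) (r, v))), p.1 ≠ r := by
      intro p hp
      rcases List.mem_flatMap.mp hp with ⟨r', hr', hp1⟩
      rcases List.mem_flatMap.mp hp1 with ⟨v', _, hp2⟩
      rw [List.eq_of_mem_replicate hp2]
      exact fun hcon => hndR.1 r' hr' hcon.symm
    have hVsne : (V r).flatMap (fun v => List.replicate (c r v) (r, v))
        = (r, v0) :: (List.replicate m (r, v0) ++
            V'.flatMap (fun v => List.replicate (c r v) (r, v))) := by
      rw [hv0, List.flatMap_cons, hm, List.replicate_succ, List.cons_append]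
    rw [List.flatMap_cons, hVsne, List.cons_append, pvBlocks]
    have hlen : V'.length ≤ (V'.flatMap (fun v => List.replicate (c r v) (r, v))).length := by
      refine pv_le_length_flatMap V' _ (fun v hv hnil => ?_)
      have h1 := hc r List.mem_cons_self v (by rw [hv0]; exact List.mem_cons_of_mem _ hv)
      have h2 := congrArg List.length hnil
      simp only [List.length_replicate, List.length_nil] at h2
      omega
    have hfB : (V r).length ≤ ((List.replicate m (r, v0) ++
        V'.flatMap (fun v => List.replicate (c r v) (r, v))) ++
        R'.flatMap (fun r => (V r).flatMap (fun v => List.replicate (c r v) (r, v)))).length + 1 := by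
      rw [hv0]
      simp only [List.length_append, List.length_cons, List.length_replicate]
      omega
    have hble := pv_block_spec (((List.replicate m (r, v0) ++
        V'.flatMap (fun v => List.replicate (c r v) (r, v))) ++
        R'.flatMap (fun r => (V r).flatMap (fun v => List.replicate (c r v) (r, v)))).length + 1)
      r (c r) (V r) 0
      (R'.flatMap (fun r => (V r).flatMap (fun v => List.replicate (c r v) (r, v))))
      hfB hrest (hc r List.mem_cons_self) (hndV r List.mem_cons_self)
    rw [hVsne, List.cons_append] at hble
    simp only [hble]
    rw [ih fuel' (by simp only [List.length_cons] at hfuel; omega)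
      (fun r' hr' => hV r' (List.mem_cons_of_mem _ hr'))
      (fun r' hr' => hc r' (List.mem_cons_of_mem _ hr'))
      (fun r' hr' => hndV r' (List.mem_cons_of_mem _ hr')) hndR.2,
      List.map_cons, List.sum_cons]

-- Q's residue-i pairs, as a mapped strided range
lemma pv_Q_filter (arr : List Int) (N K i : Int) (hK : 0 < K) (hi0 : 0 ≤ i) (hiK : i < K) :
    (pvPairs arr N K).filter (fun p => p.1 == i) =
      (PySem.List.pyRange i N K).map (fun j => (i, PySem.List.pyGetD arr j 0)) := by
  unfold pvPairs
  rw [List.filter_map]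
  have h1 : ((fun p : Int × Int => p.1 == i) ∘
      fun j => (PySem.Int.mod j K, PySem.List.pyGetD arr j 0)) =
      fun j => PySem.Int.mod j K == i := rfl
  rw [h1, pv_filter_range_eq N K i hK hi0 hiK]
  refine List.map_congr_left (fun j hj => ?_)
  have hmod : PySem.Int.mod j K = i := by
    rw [PySem.List.mem_pyRange_iff_of_pos hK] at hj
    obtain ⟨hij, hjN, c, hc⟩ := hj
    have hj' : j = i + K * c := by linarith
    rw [PySem.Int.mod_eq_emod_of_pos hK, hj', Int.add_mul_emod_self_left,
      Int.emod_eq_of_lt hi0 hiK]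
  rw [hmod]

-- the values of residue class i of Q are exactly A's class elements
lemma pv_class_elems (arr : List Int) (N K i : Int) (hK : 0 < K) (hi0 : 0 ≤ i) (hiK : i < K) :
    ((pvPairs arr N K).filter (fun p => p.1 == i)).map Prod.snd = pvElems arr N K i := by
  rw [pv_Q_filter arr N K i hK hi0 hiK]
  unfold pvElems
  rw [List.map_map]
  rfl

-- the multiplicity of (i, v) in Q is the multiplicity of v in class i
lemma pv_count_eq (arr : List Int) (N K i v : Int) (hK : 0 < K) (hi0 : 0 ≤ i) (hiK : i < K) :
    (pvPairs arr N K).count (i, v) = (pvElems arr N K i).count v := by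
  have h1 : (pvPairs arr N K).count (i, v)
      = ((pvPairs arr N K).filter (fun p => p.1 == i)).count (i, v) := by
    rw [List.count_filter (by simp)]
  rw [h1, pv_Q_filter arr N K i hK hi0 hiK]
  unfold pvElems
  show List.countP (· == (i, v)) _ = List.countP (· == v) _
  rw [List.countP_map, List.countP_map]
  refine List.countP_congr (fun j _ => ?_)
  simp only [Function.comp]
  by_cases h : PySem.List.pyGetD arr j 0 = v <;> simp [h]

-- max(counter L, default 0) as a fold over the distinct-element counts
lemma pv_maxD_counter (L : List Int) :
    PySem.List.maxD (PySem.Dict.counter L).values (fun x => x) 0 =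
      ((PySem.Set.ofList L).map (fun k => (L.count k : Int))).foldl max 0 := by
  have hvals : (PySem.Dict.counter L).values
      = (PySem.Set.ofList L).map (fun k => (L.count k : Int)) := by
    simp only [PySem.Dict.values, PySem.Dict.items_counter, List.map_map]; rfl
  rw [pv_maxD_pos _ (pv_values_pos L), hvals]

-- pvMaxC of class i is A's max count value
lemma pv_maxC_eq (arr : List Int) (N K i : Int) (hK : 0 < K) (hi0 : 0 ≤ i) (hiK : i < K) :
    pvMaxC (pvPairs arr N K) i =
      PySem.List.maxD (PySem.Dict.counter (pvElems arr N K i)).values (fun x => x) 0 := by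
  unfold pvMaxC
  rw [pv_maxD_counter]
  have h1 : (pvVs (pvPairs arr N K) i).map (fun v => ((pvPairs arr N K).count (i, v) : Int))
      = (pvVs (pvPairs arr N K) i).map (fun v => ((pvElems arr N K i).count v : Int)) :=
    List.map_congr_left (fun v _ => by rw [pv_count_eq arr N K i v hK hi0 hiK])
  rw [h1]
  have h2 : pvVs (pvPairs arr N K) i
      = PySem.List.sorted (PySem.Set.ofList (pvElems arr N K i)) (fun x => x) := by
    unfold pvVs
    rw [pv_class_elems arr N K i hK hi0 hiK]
  have hperm : (pvVs (pvPairs arr N K) i).Perm (PySem.Set.ofList (pvElems arr N K i)) := by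
    rw [h2]; exact PySem.List.sorted_perm _ _ _
  exact @List.Perm.foldl_eq _ _ max _ _ ⟨fun a b c => max_right_comm a b c⟩
    (hperm.map (fun v => ((pvElems arr N K i).count v : Int))) 0

-- residues absent from Q contribute a zero maximum
lemma pv_maxC_zero (Q : List (Int × Int)) (i : Int) (h : i ∉ pvRs Q) : pvMaxC Q i = 0 := by
  have hfil : Q.filter (fun p => p.1 == i) = [] := by
    rw [List.filter_eq_nil_iff]
    intro p hp hpi
    exact h ((pv_mem_Rs Q i).mpr (List.mem_map.mpr ⟨p, hp, beq_iff_eq.mp hpi⟩))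
  unfold pvMaxC pvVs
  rw [hfil]
  rfl

-- the residues of Q = pvPairs … K all lie in range(K)
lemma pv_Rs_sub (arr : List Int) (N K : Int) (hK : 0 < K) :
    ∀ r ∈ pvRs (pvPairs arr N K), r ∈ PySem.List.pyRange 0 K 1 := by
  intro r hr
  rw [pv_mem_Rs] at hr
  rcases List.mem_map.mp hr with ⟨p, hp, hpr⟩
  rcases List.mem_map.mp hp with ⟨j, _, hj⟩
  have : PySem.Int.mod j K = r := by rw [← hpr, ← hj]
  rw [PySem.List.mem_pyRange_one, ← this]
  exact ⟨PySem.Int.mod_nonneg j hK, PySem.Int.mod_lt j hK⟩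

-- extend the sum of maxima from the present residues to all of range(K)
lemma pv_sum_maxC (arr : List Int) (N K : Int) (hK : 0 < K) :
    ((pvRs (pvPairs arr N K)).map (pvMaxC (pvPairs arr N K))).sum =
      ((PySem.List.pyRange 0 K 1).map (pvMaxC (pvPairs arr N K))).sum := by
  have hndS : (pvRs (pvPairs arr N K)).Nodup := (pv_Rs_sorted _).imp ne_of_lt
  have hndT : (PySem.List.pyRange 0 K 1).Nodup :=
    (PySem.List.pairwise_lt_pyRange_one 0 K).imp ne_of_lt
  rw [← List.sum_toFinset _ hndS, ← List.sum_toFinset _ hndT]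
  refine Finset.sum_subset ?_ ?_
  · intro x hx
    rw [List.mem_toFinset] at *
    exact pv_Rs_sub arr N K hK x hx
  · intro x hx hnx
    rw [List.mem_toFinset] at hnx
    exact pv_maxC_zero _ x hnx

-- each index of range(N) lands in exactly one residue class
lemma pv_len_sum (K : Int) (J I : List Int) (hnd : I.Nodup)
    (hmem : ∀ j ∈ J, PySem.Int.mod j K ∈ I) :
    (I.map (fun i => ((J.filter (fun j => PySem.Int.mod j K == i)).length : Int))).sum
      = (J.length : Int) := by
  induction J with
  | nil => simp
  | cons j t ihJ =>
    have h1 : (I.map (fun i => (((j :: t).filter (fun j' => PySem.Int.mod j' K == i)).length : Int)))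
        = I.map (fun i => (if PySem.Int.mod j K = i then (1 : Int) else 0) +
            ((t.filter (fun j' => PySem.Int.mod j' K == i)).length : Int)) := by
      refine List.map_congr_left (fun i _ => ?_)
      rw [List.filter_cons]
      by_cases h : PySem.Int.mod j K = i
      · rw [if_pos (beq_iff_eq.mpr h), if_pos h, List.length_cons]
        push_cast
        ring
      · rw [if_neg (by simpa using h), if_neg h]
        ring_nf
    rw [h1, PySem.List.sum_map_add_int,
      pv_sum_single I (PySem.Int.mod j K) _ hnd
        (fun s _ hs => if_neg (fun hc => hs hc.symm)),
      if_pos (hmem j List.mem_cons_self),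
      ihJ (fun j' hj' => hmem j' (List.mem_cons_of_mem _ hj'))]
    rw [if_pos rfl, List.length_cons]
    push_cast
    ring

-- sum of the class sizes = N (= number of indices)
lemma pv_sum_len (arr : List Int) (N K : Int) (hK : 0 < K) :
    ((PySem.List.pyRange 0 K 1).map (fun i => ((pvElems arr N K i).length : Int))).sum
      = ((PySem.List.pyRange 0 N 1).length : Int) := by
  have h1 : (PySem.List.pyRange 0 K 1).map (fun i => ((pvElems arr N K i).length : Int))
      = (PySem.List.pyRange 0 K 1).map
          (fun i => ((((PySem.List.pyRange 0 N 1).filter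
            (fun j => PySem.Int.mod j K == i)).length : Int))) := by
    refine List.map_congr_left (fun i hi => ?_)
    rw [PySem.List.mem_pyRange_one] at hi
    unfold pvElems
    rw [List.length_map, pv_filter_range_eq N K i hK hi.1 hi.2]
  rw [h1, pv_len_sum K _ _ ((PySem.List.pairwise_lt_pyRange_one 0 K).imp ne_of_lt)]
  intro j _
  rw [PySem.List.mem_pyRange_one]
  exact ⟨PySem.Int.mod_nonneg j hK, PySem.Int.mod_lt j hK⟩

-- sum of differences is the difference of sums
lemma pv_sum_sub (l : List Int) (f g : Int → Int) :
    (l.map (fun i => f i - g i)).sum = (l.map f).sum - (l.map g).sum := by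
  induction l with
  | nil => simp
  | cons a t ih =>
    simp only [List.map_cons, List.sum_cons, ih]
    ring

-- B computes (number of pairs) - (sum of per-residue maxima over range(K))
lemma pv_B_eq (arr : List Int) (N K : Int) (hK : 0 < K) :
    findMinOperations_alt arr N K =
      ((PySem.List.pyRange 0 N 1).length : Int) -
        ((PySem.List.pyRange 0 K 1).map (pvMaxC (pvPairs arr N K))).sum := by
  unfold findMinOperations_alt
  rw [if_neg (by omega)]
  have hQ : (PySem.List.pyRange 0 N 1).map
      (fun j => (PySem.Int.mod j K, PySem.List.pyGetD arr j 0)) = pvPairs arr N K := rfl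
  simp only [hQ]
  rw [PySem.List.length_sorted, pv_sorted_eq_canon]
  unfold pvCanon
  rw [pv_blocks_spec _ (fun r v => (pvPairs arr N K).count (r, v)) (pvVs (pvPairs arr N K))
      (pvRs (pvPairs arr N K)) ?_ ?_ ?_ ?_ ((pv_Rs_sorted _).imp ne_of_lt)]
  · congr 1
    · unfold pvPairs
      rw [List.length_map]
    · exact pv_sum_maxC arr N K hK
  · have hnd : (pvRs (pvPairs arr N K)).Nodup := (pv_Rs_sorted _).imp ne_of_lt
    have hsub : pvRs (pvPairs arr N K) ⊆ (pvPairs arr N K).map Prod.fst := by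
      intro x hx
      exact (pv_mem_Rs _ x).mp hx
    have := (List.subperm_of_subset hnd hsub).length_le
    rw [List.length_map] at this
    exact this
  · intro r hr
    rw [pv_mem_Rs] at hr
    rcases List.mem_map.mp hr with ⟨p, hp, hpr⟩
    have : p.2 ∈ pvVs (pvPairs arr N K) r := by
      rw [pv_mem_Vs]
      rw [← hpr]
      exact hp
    exact List.ne_nil_of_mem this
  · intro r _ v hv
    rw [pv_mem_Vs] at hv
    exact List.count_pos_iff.mpr hv
  · intro r _
    exact (pv_Vs_sorted _ r).imp ne_of_lt

-- ===== VERDICT (by name: the statement is the Claim_ definition above) =====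
theorem findMinOperations_spec : Claim_equal_findMinOperations := by
  intro arr N K hdom hpre
  unfold Spec_findMinOperations
  by_cases hK : K ≤ 0
  · unfold findMinOperations findMinOperations_alt
    rw [if_pos hK, PySem.List.pyRange_one_eq_nil hK]
    rfl
  · have hK' : 0 < K := by omega
    rw [pv_A_eq, pv_B_eq arr N K hK']
    have h1 : (PySem.List.pyRange 0 K 1).map (fun i => pvContrib arr N K i)
        = (PySem.List.pyRange 0 K 1).map
            (fun i => ((pvElems arr N K i).length : Int) - pvMaxC (pvPairs arr N K) i) := by
      refine List.map_congr_left (fun i hi => ?_)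
      rw [PySem.List.mem_pyRange_one] at hi
      unfold pvContrib
      rw [pv_maxC_eq arr N K i hK' hi.1 hi.2]
    rw [h1, pv_sum_sub, pv_sum_len arr N K hK']
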